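-- pv_equiv track=rewrite | github.com/s-c-p/pea | p1to10.py | _prime_filter
-- ===== SOURCE A (Python) =====
-- def _prime_filter(num_list):
--     working_list = num_list[:]
--     # assumes num_list is sorted 0 -> largest
--     #             first element is non zero
--     for a_suspect in working_list:
--         if a_suspect == 0:
--             continue
--             # skip num's which have already been determined to be composite
--         for i, a_number in enumerate(working_list):
--             if a_number == a_suspect:
--                 continue
--                 # don't scan primes themselves
--             if a_number < a_suspect:
--                 continue
--                 # no sense in finding 5 (smaller) % 10 (larger)
--             if a_number % a_suspect == 0:
--                 working_list[i] = 0
--                 # now we know this number is composite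
--     return list(filter(None, working_list))
-- ===== SOURCE B (Python) =====
-- def _prime_filter(num_list):
--     # Pure one-pass filter: x survives iff x != 0 and no nonzero smaller
--     # element of the list divides it.  No mutation, no zero sentinels.
--     values = set(num_list)
--     return [x for x in num_list
--             if x != 0 and not any(y != 0 and y < x and x % y == 0 for y in values)]
-- ===== Notes on version B (the rewrite author's own statement) =====
-- stated objective: simpler
-- what changed: Replaces A's in-place zeroing passes over a mutating copy (each surviving element rescanning and overwriting the whole list, then a final filter of the sentinels) by a single direct filter with a closed predicate ('no smaller nonzero list element divides x') checked against the deduplicated value set.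
import Mathlib
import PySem

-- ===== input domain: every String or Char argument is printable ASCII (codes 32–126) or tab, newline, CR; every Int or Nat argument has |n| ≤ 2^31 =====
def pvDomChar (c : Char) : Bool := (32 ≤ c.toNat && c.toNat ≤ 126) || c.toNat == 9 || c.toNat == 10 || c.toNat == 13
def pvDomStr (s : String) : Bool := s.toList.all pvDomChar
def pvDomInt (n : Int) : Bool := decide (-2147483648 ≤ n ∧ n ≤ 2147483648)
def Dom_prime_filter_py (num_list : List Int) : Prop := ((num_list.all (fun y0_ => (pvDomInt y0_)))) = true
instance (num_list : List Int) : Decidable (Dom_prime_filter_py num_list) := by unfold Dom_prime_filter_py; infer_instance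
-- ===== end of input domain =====

-- B replaces A's in-place zeroing passes over a mutating copy by a single direct
-- filter with a closed predicate ("no smaller nonzero list element divides x");
-- objective: simpler.

-- ===== PORT A =====
-- inner 'for i, a_number in enumerate(working_list)' pass for one nonzero suspect v:
-- the only writes are 'working_list[i] = 0' at the index being read, so the pass is a
-- left-to-right element-wise rewrite (exact).
def pvInnerA (v : Int) : List Int → List Int
  | [] => []
  | a :: rest =>
      (if a ≠ v ∧ ¬ a < v ∧ PySem.Int.mod a v = 0 then 0 else a) :: pvInnerA v rest

-- one iteration of the outer 'for a_suspect in working_list' loop (Python iterates the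
-- mutating list by internal index; its length never changes, so index j runs 0..n-1)
def pvStepA (w : List Int) (j : Nat) : List Int :=
  let v := w.getD j 0
  if v = 0 then w else pvInnerA v w

def prime_filter_py (num_list : List Int) : List Int :=
  let working := (List.range num_list.length).foldl pvStepA num_list
  working.filter (fun x => decide (x ≠ 0))   -- list(filter(None, working_list))

-- ===== PORT B =====
def prime_filter_py_alt (num_list : List Int) : List Int :=
  let values : PySem.Set Int := PySem.Set.ofList num_list
  num_list.filter (fun x =>
    decide (x ≠ 0) &&
      !(values.any (fun y =>
          decide (y ≠ 0) && decide (y < x) && decide (PySem.Int.mod x y = 0))))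

-- ===== PRECONDITION & SPEC =====
def Spec_prime_filter_py (num_list : List Int) (out : List Int) : Prop := out = prime_filter_py_alt num_list
instance (num_list : List Int) (out : List Int) : Decidable (Spec_prime_filter_py num_list out) := by unfold Spec_prime_filter_py; infer_instance

-- ===== CLAIM (what is proved, stated in full; the proofs are below) =====
def Claim_equal_prime_filter_py : Prop := ∀ (num_list : List Int), Dom_prime_filter_py num_list → Spec_prime_filter_py num_list (prime_filter_py num_list)

-- ===== LEMMAS AND PROOFS =====

-- x has a "bad" divisor in l: a nonzero smaller element of l dividing x
abbrev pvBad (l : List Int) (x : Int) : Prop := ∃ y ∈ l, y ≠ 0 ∧ y < x ∧ y ∣ x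

-- what the final working list holds at a position originally holding x
def pvG (l : List Int) (x : Int) : Int := if x ≠ 0 ∧ ¬ pvBad l x then x else 0

-- invariant of A's working list: each slot holds its original value, or 0 with the
-- original value having a bad divisor
def pvInv (l w : List Int) : Prop :=
  w.length = l.length ∧
    ∀ i, i < l.length →
      w.getD i 0 = l.getD i 0 ∨ (w.getD i 0 = 0 ∧ pvBad l (l.getD i 0))

theorem pvInnerA_eq_map (v : Int) (w : List Int) :
    pvInnerA v w = w.map (fun a => if a ≠ v ∧ ¬ a < v ∧ PySem.Int.mod a v = 0 then 0 else a) := by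
  induction w with
  | nil => rfl
  | cons a rest ih => simp [pvInnerA, ih]

theorem pvGetD_map_zero (f : Int → Int) (hf : f 0 = 0) (w : List Int) (i : Nat) :
    (w.map f).getD i 0 = f (w.getD i 0) := by
  rcases Nat.lt_or_ge i w.length with h | h
  · simp [List.getD_eq_getElem?_getD, List.getElem?_map, List.getElem?_eq_getElem h]
  · simp [List.getD_eq_getElem?_getD, List.getElem?_map,
      List.getElem?_eq_none (by simpa using h : w.length ≤ i), hf]

theorem pvStep_inv (l w : List Int) (j : Nat) (h : pvInv l w) : pvInv l (pvStepA w j) := by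
  obtain ⟨hlen, hinv⟩ := h
  unfold pvStepA
  set v := w.getD j 0 with hv
  by_cases hv0 : v = 0
  · rw [if_pos hv0]; exact ⟨hlen, hinv⟩
  · rw [if_neg hv0, pvInnerA_eq_map]
    refine ⟨by simpa using hlen, ?_⟩
    intro i hi
    rw [pvGetD_map_zero _ (by simp [Ne.symm hv0]) w i]
    by_cases hc : w.getD i 0 ≠ v ∧ ¬ w.getD i 0 < v ∧ PySem.Int.mod (w.getD i 0) v = 0
    · -- slot i gets zeroed by suspect v
      rw [if_pos hc]
      right
      obtain ⟨hne, hge, hdvd⟩ := hc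
      rw [PySem.Int.mod_eq_zero_iff_dvd] at hdvd
      -- v is an actual element of l (it is nonzero, so the invariant pins it)
      have hjlt : j < l.length := by
        by_contra hj
        have : w.getD j 0 = 0 := by
          apply List.getD_eq_default
          omega
        exact hv0 (hv.trans this)
      have hvval : v = l.getD j 0 := by
        rcases hinv j hjlt with h1 | h2
        · rw [hv, h1]
        · exact absurd (hv.trans h2.1) hv0
      have hvmem : v ∈ l := by
        rw [hvval, List.getD_eq_getElem l 0 hjlt]; exact List.getElem_mem _
      have hvlt : v < w.getD i 0 := lt_of_le_of_ne (not_lt.mp hge) (Ne.symm hne)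
      rcases hinv i hi with h1 | h2
      · -- slot held its original value; v is a bad divisor of it
        rw [h1] at hvlt hdvd
        exact ⟨rfl, v, hvmem, hv0, hvlt, hdvd⟩
      · -- slot already 0; then v < 0 and v ∣ 0, making v bad for the original too
        rcases hinv i hi with h1' | _
        · rw [h1'] at hvlt hdvd
          exact ⟨rfl, v, hvmem, hv0, hvlt, hdvd⟩
        · rw [h2.1] at hvlt hdvd
          rcases hinv i hi with h1'' | hbad
          · rw [← h1'', h2.1]
            exact ⟨rfl, v, hvmem, hv0, hvlt, hdvd⟩
          · exact ⟨rfl, hbad.2⟩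
    · rw [if_neg hc]
      exact hinv i hi

theorem pvFold_inv (l : List Int) (js : List Nat) (w : List Int) (h : pvInv l w) :
    pvInv l (js.foldl pvStepA w) := by
  induction js generalizing w with
  | nil => exact h
  | cons k rest ih => exact ih _ (pvStep_inv l w k h)

-- zeros persist: once a slot is 0 it stays 0 through every further pass
theorem pvStep_zero (w : List Int) (j : Nat) (i : Nat) (h : w.getD i 0 = 0) :
    (pvStepA w j).getD i 0 = 0 := by
  unfold pvStepA
  set v := w.getD j 0
  by_cases hv0 : v = 0
  · rw [if_pos hv0]; exact h
  · rw [if_neg hv0]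
    rw [pvInnerA_eq_map, pvGetD_map_zero _ (by simp [Ne.symm hv0]) w i, h]
    simp [Ne.symm hv0]

theorem pvFold_zero (js : List Nat) (w : List Int) (i : Nat) (h : w.getD i 0 = 0) :
    (js.foldl pvStepA w).getD i 0 = 0 := by
  induction js generalizing w with
  | nil => exact h
  | cons k rest ih => exact ih _ (pvStep_zero w k i h)

-- a MINIMAL bad divisor of x is never zeroed: its slot still holds it in any invariant state
theorem pvMin_slot (l w : List Int) (x m : Int) (j : Nat) (hj : j < l.length)
    (hjm : l.getD j 0 = m) (hmx : m < x) (hmdvd : m ∣ x)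
    (hmin : ∀ z ∈ l, z ≠ 0 → z < x → z ∣ x → m ≤ z)
    (hinv : pvInv l w) : w.getD j 0 = m := by
  rcases hinv.2 j hj with h1 | h2
  · rw [h1, hjm]
  · exfalso
    rw [hjm] at h2
    obtain ⟨z, hzmem, hz0, hzm, hzdvd⟩ := h2.2
    have hzx : z ∣ x := hzdvd.trans hmdvd
    have := hmin z hzmem hz0 (hzm.trans hmx) hzx
    omega

-- completeness: if the original value at slot i is nonzero and has a bad divisor,
-- slot i ends up 0 after the outer loop runs over any index list containing the
-- position of a minimal bad divisor
theorem pvFold_complete (l : List Int) (x m : Int) (i j : Nat)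
    (hi : i < l.length) (hx : l.getD i 0 = x)
    (hj : j < l.length) (hjm : l.getD j 0 = m)
    (hm : m ≠ 0) (hmx : m < x) (hmdvd : m ∣ x)
    (hmin : ∀ z ∈ l, z ≠ 0 → z < x → z ∣ x → m ≤ z) :
    ∀ (js : List Nat) (w : List Int), pvInv l w → j ∈ js →
      (js.foldl pvStepA w).getD i 0 = 0 := by
  intro js
  induction js with
  | nil => intro w _ hmem; exact absurd hmem (List.not_mem_nil)
  | cons k rest ih =>
    intro w hinv hmem
    by_cases hk : k = j
    · -- this is the step where the minimal divisor m acts: slot i becomes 0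
      subst hk
      have hslot : w.getD k 0 = m := pvMin_slot l w x m k hj hjm hmx hmdvd hmin hinv
      have hzero : (pvStepA w k).getD i 0 = 0 := by
        unfold pvStepA
        rw [hslot]
        simp only [hm, if_false]
        rw [pvInnerA_eq_map, pvGetD_map_zero _ (by simp [Ne.symm hm]) w i]
        rcases hinv.2 i hi with h1 | h2
        · rw [h1, hx]
          have : x ≠ m := by omega
          simp [this, not_lt.mpr (le_of_lt hmx), (PySem.Int.mod_eq_zero_iff_dvd x m).mpr hmdvd]
        · rw [h2.1]; simp [Ne.symm hm]
      simp only [List.foldl_cons]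
      exact pvFold_zero rest _ i hzero
    · rcases List.mem_cons.mp hmem with h | h
      · exact absurd h.symm hk
      · simp only [List.foldl_cons]
        exact ih (pvStepA w k) (pvStep_inv l w k hinv) h

-- the final working list, slot by slot
theorem pvFinal_getD (l : List Int) (i : Nat) (hi : i < l.length) :
    ((List.range l.length).foldl pvStepA l).getD i 0 = pvG l (l.getD i 0) := by
  have hinv0 : pvInv l l := ⟨rfl, fun i _ => Or.inl rfl⟩
  have hinv := pvFold_inv l (List.range l.length) l hinv0
  set x := l.getD i 0 with hx
  by_cases hx0 : x = 0
  · rcases hinv.2 i hi with h1 | h2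
    · rw [h1, ← hx, hx0]; simp [pvG]
    · rw [h2.1, pvG, hx0]; simp
  · by_cases hbad : pvBad l x
    · -- pick a minimal bad divisor m of x, at some index j
      obtain ⟨y0, hy0mem, hy00, hy0x, hy0dvd⟩ := hbad
      have hne : (l.filter (fun z => decide (z ≠ 0 ∧ z < x ∧ z ∣ x))) ≠ [] := by
        intro hcon
        have : y0 ∈ l.filter (fun z => decide (z ≠ 0 ∧ z < x ∧ z ∣ x)) := by
          simp [List.mem_filter, hy0mem, hy00, hy0x, hy0dvd]
        rw [hcon] at this; exact absurd this (List.not_mem_nil)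
      obtain ⟨m, hmsome⟩ : ∃ m, (l.filter (fun z => decide (z ≠ 0 ∧ z < x ∧ z ∣ x))).min? = some m := by
        cases hmin : (l.filter (fun z => decide (z ≠ 0 ∧ z < x ∧ z ∣ x))).min? with
        | none => exact absurd (List.min?_eq_none_iff.mp hmin) hne
        | some m => exact ⟨m, rfl⟩
      obtain ⟨hmmem, hmle⟩ := List.min?_eq_some_iff.mp hmsome
      have hmfilt := List.mem_filter.mp hmmem
      have hm0 : m ≠ 0 := by
        have := of_decide_eq_true hmfilt.2; exact this.1
      have hmx : m < x := (of_decide_eq_true hmfilt.2).2.1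
      have hmdvd : m ∣ x := (of_decide_eq_true hmfilt.2).2.2
      have hmin : ∀ z ∈ l, z ≠ 0 → z < x → z ∣ x → m ≤ z := by
        intro z hz hz0 hzx hzdvd
        exact hmle z (List.mem_filter.mpr ⟨hz, by simp [hz0, hzx, hzdvd]⟩)
      obtain ⟨j, hjlt, hjval⟩ := List.mem_iff_getElem.mp hmfilt.1
      have hjm : l.getD j 0 = m := by rw [List.getD_eq_getElem l 0 hjlt, hjval]
      have hjrange : j ∈ List.range l.length := List.mem_range.mpr hjlt
      have := pvFold_complete l x m i j hi hx.symm hjlt hjm hm0 hmx hmdvd hmin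
        (List.range l.length) l hinv0 hjrange
      rw [this]
      simp only [pvG]
      rw [if_neg]
      intro hcon
      exact hcon.2 ⟨y0, hy0mem, hy00, hy0x, hy0dvd⟩
    · rcases hinv.2 i hi with h1 | h2
      · rw [h1, ← hx, pvG]; simp [hx0, hbad]
      · rw [← hx] at h2; exact absurd h2.2 hbad
  
theorem pvFinal_eq_map (l : List Int) :
    (List.range l.length).foldl pvStepA l = l.map (pvG l) := by
  have hinv := pvFold_inv l (List.range l.length) l ⟨rfl, fun i _ => Or.inl rfl⟩
  apply List.ext_getElem
  · rw [hinv.1, List.length_map]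
  · intro i h1 h2
    have hi : i < l.length := by simpa using h2
    have := pvFinal_getD l i hi
    rw [List.getD_eq_getElem _ 0 h1] at this
    rw [this, List.getElem_map, List.getD_eq_getElem l 0 hi]

theorem pvFilter_map (l ls : List Int) :
    (ls.map (pvG l)).filter (fun x => decide (x ≠ 0)) =
      ls.filter (fun x => decide (x ≠ 0 ∧ ¬ pvBad l x)) := by
  induction ls with
  | nil => rfl
  | cons a rest ih =>
    simp only [List.map_cons, List.filter_cons]
    by_cases h : a ≠ 0 ∧ ¬ pvBad l a
    · have h1 : pvG l a = a := if_pos h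
      rw [h1, if_pos (decide_eq_true h.1), if_pos (decide_eq_true h), ih]
    · have h1 : pvG l a = 0 := if_neg h
      rw [h1, if_neg (by simp), if_neg (fun hc => h (of_decide_eq_true hc)), ih]

-- ===== VERDICT (by name: the statement is the Claim_ definition above) =====
theorem prime_filter_py_spec : Claim_equal_prime_filter_py := by
  intro l _
  show prime_filter_py l = prime_filter_py_alt l
  unfold prime_filter_py prime_filter_py_alt
  rw [pvFinal_eq_map, pvFilter_map]
  apply List.filter_congr
  intro x _
  by_cases hx0 : x = 0
  · simp [hx0]
  · by_cases hbad : pvBad l x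
    · obtain ⟨y, hymem, hy0, hyx, hydvd⟩ := id hbad
      simp [hbad]
      exact fun _ => ⟨y, hymem, ⟨hy0, hyx⟩, (PySem.Int.mod_eq_zero_iff_dvd x y).mpr hydvd⟩
    · simp [hbad, hx0]
      intro z hz hz0 hzx hzmod
      exact hbad ⟨z, hz, hz0, hzx, (PySem.Int.mod_eq_zero_iff_dvd x z).mp hzmod⟩
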